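-- pv_equiv track=rewrite | github.com/tanner-wauchope/english_semantics | python/scan.py | is_quote
-- ===== SOURCE A (Python) =====
-- def is_quote(lexeme):
--     if len(lexeme) < 2 or lexeme[-1] != '"':
--         return False
--
--     trailing_slashes = 0
--     for char in reversed(lexeme[:-1]):
--         if char == '\\':
--             trailing_slashes += 1
--         else:
--             break
--     return trailing_slashes % 2 == 0
-- ===== SOURCE B (Python) =====
-- def is_quote(lexeme):
--     escaped = False        # whether the NEXT character is escaped
--     cur_escaped = False    # whether the character just processed was escaped
--     for ch in lexeme:
--         cur_escaped = escaped
--         escaped = (not escaped) and ch == '\\'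
--     return len(lexeme) >= 2 and lexeme.endswith('"') and not cur_escaped
-- ===== Notes on version B (the rewrite author's own statement) =====
-- stated objective: alternative
-- what changed: Replaces A's early-return guard plus right-to-left trailing-backslash counting with parity test by a single forward scan over the whole string carrying an escape-state pair (next-char-escaped, current-char-escaped), with one final conjunction: length >= 2, ends with a quote, and the last character was not escaped.
import Mathlib
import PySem

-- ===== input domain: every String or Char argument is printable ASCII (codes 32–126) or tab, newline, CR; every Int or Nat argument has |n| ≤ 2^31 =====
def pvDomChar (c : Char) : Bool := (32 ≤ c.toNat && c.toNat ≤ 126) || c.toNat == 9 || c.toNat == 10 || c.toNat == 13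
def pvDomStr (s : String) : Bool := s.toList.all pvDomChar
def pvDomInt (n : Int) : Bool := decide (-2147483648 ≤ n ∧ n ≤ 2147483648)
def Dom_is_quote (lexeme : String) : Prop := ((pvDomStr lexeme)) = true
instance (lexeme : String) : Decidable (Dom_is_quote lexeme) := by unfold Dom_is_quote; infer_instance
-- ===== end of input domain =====

-- B replaces A's early-return guard + right-to-left trailing-backslash parity count by one
-- forward scan over the whole string carrying an escape-state pair, ending in a conjunction.

-- ===== PORT A =====
-- the 'for char in reversed(lexeme[:-1])' loop with break: counts leading '\\' of the
-- reversed list, stops at the first other character (exact port of the loop)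
def pvTrailA : List Char → Nat
  | [] => 0
  | c :: rest => if c = '\\' then pvTrailA rest + 1 else 0

def is_quote (lexeme : String) : Bool :=
  let l := lexeme.toList
  if l.length < 2 ∨ PySem.List.pyGet? l (-1) ≠ some '"' then false
  else pvTrailA l.dropLast.reverse % 2 == 0
  -- l.dropLast = lexeme[:-1] (exact for len ≥ 2); reversed(...) = .reverse

-- ===== PORT B =====
-- state (escaped, cur_escaped): escaped = next char is escaped, cur_escaped = the
-- character just processed was escaped; exact port of Source B's loop over the whole string
def pvScanB : Bool × Bool → List Char → Bool × Bool
  | st, [] => st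
  | (e, _), c :: rest => pvScanB (!e && c == '\\', e) rest

def is_quote_alt (lexeme : String) : Bool :=
  let l := lexeme.toList
  let st := pvScanB (false, false) l
  decide (2 ≤ l.length) && PySem.Str.endswith lexeme "\"" && !st.2

-- ===== PRECONDITION & SPEC =====
def Spec_is_quote (lexeme : String) (out : Bool) : Prop := out = is_quote_alt lexeme
instance (lexeme : String) (out : Bool) : Decidable (Spec_is_quote lexeme out) := by unfold Spec_is_quote; infer_instance

-- ===== CLAIM (what is proved, stated in full; the proofs are below) =====
def Claim_equal_is_quote : Prop := ∀ (lexeme : String), Dom_is_quote lexeme → Spec_is_quote lexeme (is_quote lexeme)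

-- ===== LEMMAS AND PROOFS =====
-- the single-state forward escape scan (proof-only abstraction of pvScanB's first component)
def escF : Bool → List Char → Bool
  | e, [] => e
  | e, c :: rest => escF (!e && c == '\\') rest

theorem pvScanB_snd_append (e b : Bool) (xs : List Char) (c : Char) :
    (pvScanB (e, b) (xs ++ [c])).2 = escF e xs := by
  induction xs generalizing e b with
  | nil => simp [pvScanB, escF]
  | cons x rest ih => simp [pvScanB, escF, ih]

theorem escF_append (e : Bool) (xs : List Char) (c : Char) :
    escF e (xs ++ [c]) = (!escF e xs && c == '\\') := by
  induction xs generalizing e with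
  | nil => rfl
  | cons x xs ih => simp [escF, ih]

-- the escape flag after a forward scan of s.reverse is the odd-parity of A's count on s
theorem escF_parity (s : List Char) :
    escF false s.reverse = (pvTrailA s % 2 == 1) := by
  induction s with
  | nil => rfl
  | cons c s ih =>
    simp only [List.reverse_cons, escF_append, ih, pvTrailA]
    by_cases hc : c = '\\'
    · subst hc
      rcases Nat.mod_two_eq_zero_or_one (pvTrailA s) with h | h <;>
        simp [h, Nat.add_mod]
    · simp [hc]

theorem pvKey (r : List Char) :
    (pvTrailA r.reverse % 2 == 0) = !escF false r := by
  have h := escF_parity r.reverse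
  rw [List.reverse_reverse] at h
  rw [h]
  rcases Nat.mod_two_eq_zero_or_one (pvTrailA r.reverse) with h1 | h1 <;> simp [h1]

-- endswith a single quote char = last char is '"'
theorem endswith_quote (s : String) :
    PySem.Str.endswith s "\"" = (s.toList.getLast? == some '"') := by
  have h2 : ("\"" : String).toList = ['"'] := rfl
  by_cases hl : s.toList.getLast? = some '"'
  · have hs : ['"'] <:+ s.toList := by
      rcases s.toList.eq_nil_or_concat with h | ⟨xs, x, h⟩
      · rw [h] at hl; simp at hl
      · rw [h] at hl ⊢
        simp only [List.concat_eq_append, List.getLast?_concat, Option.some.injEq] at hl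
        exact ⟨xs, by rw [hl]; simp⟩
    simp [PySem.Str.endswith_eq, h2, hl, (PySem.Chars.endswith_iff _ _).mpr hs]
  · have hs : ¬ ['"'] <:+ s.toList := by
      rintro ⟨t, ht⟩
      exact hl (by rw [← ht]; simp)
    have hfalse : PySem.Chars.endswith s.toList ['"'] = false := by
      rcases Bool.eq_false_or_eq_true (PySem.Chars.endswith s.toList ['"']) with h | h
      · exact absurd ((PySem.Chars.endswith_iff _ _).mp h) hs
      · exact h
    simp [PySem.Str.endswith_eq, h2, hl, hfalse]

-- ===== VERDICT (by name: the statement is the Claim_ definition above) =====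
theorem is_quote_spec : Claim_equal_is_quote := by
  intro lexeme _
  simp only [Spec_is_quote, is_quote, is_quote_alt, PySem.List.pyGet?_neg_one, endswith_quote]
  generalize lexeme.toList = l
  rcases l.eq_nil_or_concat with rfl | ⟨xs, x, rfl⟩
  · simp
  · simp only [List.concat_eq_append, List.dropLast_concat, List.getLast?_concat,
      pvScanB_snd_append, pvKey]
    have hlen : (xs ++ [x]).length = xs.length + 1 := by simp
    by_cases hx : x = '"' <;> by_cases h0 : xs = [] <;> simp_all [escF]
    exact fun _ => Nat.one_le_iff_ne_zero.mpr fun h => h0 (List.eq_nil_of_length_eq_zero h)
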